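-- pv_equiv track=rewrite | github.com/costa-group/gasol-optimizer | smt_encoding/complete_encoding/pre_order_encoding.py | generate_instr_dependencies
-- ===== SOURCE A (Python) =====
-- def generate_instr_dependencies(instr, number_of_instructions_to_execute, previous_values, dependency_graph):
--
--     # Base case: it has been already analyzed, so we return the values associated.
--     if instr in previous_values:
--         return number_of_instructions_to_execute[instr], previous_values[instr]
--
--     number_of_instructions_needed = 0
--     instructions_dependency = set()
--
--     # Recursive case: we obtain the output for each previous instruction and update the values
--     for previous_instr in dependency_graph[instr]:
--
--         previous_number_of_instr_needed, previous_instructions_dependency = \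
--             generate_instr_dependencies(previous_instr, number_of_instructions_to_execute,
--                                         previous_values, dependency_graph)
--
--         # We need the number of instructions needed for previous instruction plus one (executing that instruction)
--         number_of_instructions_needed += previous_number_of_instr_needed + 1
--
--         # We need to add previous instruction to its associated values, as it wasn't added yet
--         previous_instructions = previous_instructions_dependency | {previous_instr}
--
--         # See detailed explanation for more information to understand this step
--         repeated_instructions = instructions_dependency.intersection(previous_instructions)
--
--         # Maximal elements are those that don't appear as a previous instruction for any of the repeated instructions
--         maximal_elements = repeated_instructions.difference(set().union(*[previous_values[repeated_instr]
--                                                                           for repeated_instr in repeated_instructions]))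
--         for repeated_instr in maximal_elements:
--
--             # If it is the maximal representative, then the necessary number of previous instructions is 0
--             # (as it could have been duplicated)
--             number_of_instructions_needed -= number_of_instructions_to_execute[repeated_instr]
--
--         # We update instructions_dependency
--         instructions_dependency = instructions_dependency.union(previous_instructions)
--
--     number_of_instructions_to_execute[instr] = number_of_instructions_needed
--     previous_values[instr] = instructions_dependency
--
--     return number_of_instructions_needed, instructions_dependency
-- ===== SOURCE B (Python) =====
-- def generate_instr_dependencies(instr, number_of_instructions_to_execute, previous_values, dependency_graph):
--     # Base case: already analyzed, reuse the stored values.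
--     if instr in previous_values:
--         return number_of_instructions_to_execute[instr], previous_values[instr]
--
--     # Bottom-up worklist instead of recursive descent: sweep the dependency
--     # dict repeatedly, finalizing every node whose predecessors are all
--     # already finalized, until a sweep changes nothing.
--     counts = dict(number_of_instructions_to_execute)
--     deps = dict(previous_values)
--     changed = True
--     while changed:
--         changed = False
--         for node, preds in dependency_graph.items():
--             if node in deps or any(p not in deps for p in preds):
--                 continue
--             total, acc = 0, set()
--             for p in preds:
--                 previous = deps[p] | {p}
--                 repeated = acc & previous
--                 maximal = repeated - set().union(*[deps[r] for r in repeated])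
--                 total += counts[p] + 1 - sum(counts[r] for r in maximal)
--                 acc |= previous
--             counts[node], deps[node] = total, acc
--             changed = True
--
--     number_of_instructions_to_execute[instr] = counts[instr]
--     previous_values[instr] = deps[instr]
--     return counts[instr], deps[instr]
-- ===== Notes on version B (the rewrite author's own statement) =====
-- stated objective: alternative
-- what changed: Replaces the recursive memoized descent with an iterative bottom-up worklist: repeated sweeps over the dependency dict that finalize any node whose predecessors are all already finalized, until a sweep changes nothing; the per-node accumulation is the same.
import Mathlib
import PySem

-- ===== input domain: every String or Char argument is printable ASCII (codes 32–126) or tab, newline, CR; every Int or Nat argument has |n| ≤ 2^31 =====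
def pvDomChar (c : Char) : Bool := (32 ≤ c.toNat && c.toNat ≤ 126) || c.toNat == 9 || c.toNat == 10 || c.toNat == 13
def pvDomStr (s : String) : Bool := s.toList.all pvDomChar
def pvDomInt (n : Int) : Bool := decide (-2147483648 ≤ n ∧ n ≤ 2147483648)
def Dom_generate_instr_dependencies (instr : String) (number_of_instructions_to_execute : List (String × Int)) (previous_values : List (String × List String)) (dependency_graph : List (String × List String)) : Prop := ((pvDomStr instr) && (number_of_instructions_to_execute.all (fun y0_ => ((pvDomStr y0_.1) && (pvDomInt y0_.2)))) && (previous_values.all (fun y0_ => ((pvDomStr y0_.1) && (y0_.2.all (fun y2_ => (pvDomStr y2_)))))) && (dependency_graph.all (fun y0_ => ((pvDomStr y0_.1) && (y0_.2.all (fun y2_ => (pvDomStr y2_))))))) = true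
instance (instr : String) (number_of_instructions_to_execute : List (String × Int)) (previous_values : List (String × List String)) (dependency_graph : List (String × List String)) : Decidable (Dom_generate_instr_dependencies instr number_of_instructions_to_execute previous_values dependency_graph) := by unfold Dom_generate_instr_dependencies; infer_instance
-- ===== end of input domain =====

-- B replaces A's recursive memoized descent by an iterative bottom-up worklist (repeated sweeps
-- finalizing nodes whose predecessors are all finalized, until a quiet sweep); return-value
-- equivalence only — A memoizes every visited node into the two shared dicts while B writes back
-- only the entry for `instr`.

-- ===== PORT A =====
-- A's recursion with the two mutable dicts threaded through; fuel only makes the recursion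
-- total (Pre_ guarantees it is never exhausted).
def pvGoA (graph : PySem.Dict String (List String)) :
    Nat → String → PySem.Dict String Int → PySem.Dict String (List String) →
    ((Int × List String) × PySem.Dict String Int × PySem.Dict String (List String))
  | 0, _, counts, deps => ((0, []), counts, deps)
  | fuel+1, instr, counts, deps =>
    match deps.get? instr with
    | some v => ((counts.getD instr 0, v), counts, deps)   -- base case: already analyzed
    | none =>
      -- for previous_instr in dependency_graph[instr]: …
      let r := (graph.getD instr []).foldl
        (fun (st : (Int × PySem.Set String) × PySem.Dict String Int × PySem.Dict String (List String)) p =>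
          let res := pvGoA graph fuel p st.2.1 st.2.2
          let previous := PySem.Set.union res.1.2 [p]
          let repeated := PySem.Set.inter st.1.2 previous
          let bigU := repeated.foldl (fun u rr => PySem.Set.update u (res.2.2.getD rr [])) PySem.Set.empty
          let maximal := PySem.Set.diff repeated bigU
          ((st.1.1 + res.1.1 + 1 - maximal.foldl (fun a rr => a + res.2.1.getD rr 0) 0,
            PySem.Set.union st.1.2 previous), res.2))
        ((0, PySem.Set.empty), counts, deps)
      ((r.1.1, r.1.2), r.2.1.insert instr r.1.1, r.2.2.insert instr r.1.2)

def generate_instr_dependencies (instr : String) (number_of_instructions_to_execute : List (String × Int)) (previous_values : List (String × List String)) (dependency_graph : List (String × List String)) : Int × List String :=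
  (pvGoA (PySem.Dict.mk dependency_graph) (dependency_graph.length + 1) instr
    (PySem.Dict.mk number_of_instructions_to_execute) (PySem.Dict.mk previous_values)).1

-- ===== PORT B =====
-- the shared inner accumulation of B, reading finalized predecessors from the current tables
def pvStepFn (counts : PySem.Dict String Int) (deps : PySem.Dict String (List String))
    (acc : Int × PySem.Set String) (p : String) : Int × PySem.Set String :=
  let previous := PySem.Set.union (deps.getD p []) [p]
  let repeated := PySem.Set.inter acc.2 previous
  let bigU := repeated.foldl (fun u rr => PySem.Set.update u (deps.getD rr [])) PySem.Set.empty
  let maximal := PySem.Set.diff repeated bigU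
  (acc.1 + counts.getD p 0 + 1 - maximal.foldl (fun a rr => a + counts.getD rr 0) 0,
   PySem.Set.union acc.2 previous)

-- one step of a sweep: skip a node already finalized or with an unfinalized predecessor,
-- otherwise finalize it and record that the sweep changed something
def pvStepB (st : PySem.Dict String Int × PySem.Dict String (List String) × Bool)
    (kv : String × List String) : PySem.Dict String Int × PySem.Dict String (List String) × Bool :=
  if st.2.1.contains kv.1 || kv.2.any (fun p => !(st.2.1.contains p)) then st
  else
    let r := kv.2.foldl (pvStepFn st.1 st.2.1) ((0 : Int), PySem.Set.empty)
    (st.1.insert kv.1 r.1, st.2.1.insert kv.1 r.2, true)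

-- `while changed:` — fuel only bounds the sweeps (a sweep that changes something finalizes a new
-- graph key, so graph.length + 1 sweeps are never exceeded before a quiet sweep)
def pvLoopB (g : List (String × List String)) :
    Nat → PySem.Dict String Int × PySem.Dict String (List String) →
    PySem.Dict String Int × PySem.Dict String (List String)
  | 0, st => st
  | f+1, st =>
    let r := g.foldl pvStepB (st.1, st.2, false)
    if r.2.2 then pvLoopB g f (r.1, r.2.1) else (r.1, r.2.1)

def generate_instr_dependencies_alt (instr : String) (number_of_instructions_to_execute : List (String × Int)) (previous_values : List (String × List String)) (dependency_graph : List (String × List String)) : Int × List String :=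
  match (PySem.Dict.mk previous_values).get? instr with
  | some v => ((PySem.Dict.mk number_of_instructions_to_execute).getD instr 0, v)
  | none =>
    let st := pvLoopB dependency_graph (dependency_graph.length + 1)
      (PySem.Dict.mk number_of_instructions_to_execute, PySem.Dict.mk previous_values)
    (st.1.getD instr 0, st.2.getD instr [])

-- ===== PRECONDITION & SPEC =====
-- pvGrounded P g n: the nodes resolvable within n rounds from the already-analyzed keys P — a
-- reachability/well-foundedness closure of the INPUT graph (which instructions have an acyclic,
-- fully present dependency cone), not a run of either port.
def pvGrounded (P : List String) (g : List (String × List String)) : Nat → List String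
  | 0 => P
  | n+1 =>
    pvGrounded P g n ++
      (g.filter (fun kv => !((pvGrounded P g n).contains kv.1) &&
        kv.2.all (fun p => (pvGrounded P g n).contains p))).map Prod.fst

-- Pre_ excludes exactly the inputs on which A raises: a RecursionError on a cyclic dependency
-- cone and a KeyError when instr or a transitive dependency is missing from dependency_graph and
-- previous_values (both captured by the pvGrounded closure), and a KeyError when a key of
-- previous_values referenced by the graph or by another stored dependency set has no entry in
-- number_of_instructions_to_execute (a slight over-approximation of the keys A actually reads,
-- see claim cites); duplicate-free dict keys and previous_values sets closed under their own
-- keys are type-level facts of the Python dicts/sets A manipulates, and all of these are only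
-- required in the not-yet-analyzed branch, where A reads them.
def Pre_generate_instr_dependencies (instr : String) (number_of_instructions_to_execute : List (String × Int)) (previous_values : List (String × List String)) (dependency_graph : List (String × List String)) : Prop :=
  (instr ∈ previous_values.map Prod.fst ∧ instr ∈ number_of_instructions_to_execute.map Prod.fst) ∨
  (instr ∉ previous_values.map Prod.fst ∧
   (previous_values.map Prod.fst).Nodup ∧
   (dependency_graph.map Prod.fst).Nodup ∧
   (∀ k ∈ previous_values.map Prod.fst,
     ((∃ kv ∈ dependency_graph, k ∈ kv.2) ∨ (∃ kv ∈ previous_values, k ∈ kv.2)) →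
     k ∈ number_of_instructions_to_execute.map Prod.fst) ∧
   (∀ kv ∈ previous_values, ∀ x ∈ kv.2, x ∈ previous_values.map Prod.fst) ∧
   instr ∈ pvGrounded (previous_values.map Prod.fst) dependency_graph dependency_graph.length)
instance (instr : String) (number_of_instructions_to_execute : List (String × Int)) (previous_values : List (String × List String)) (dependency_graph : List (String × List String)) : Decidable (Pre_generate_instr_dependencies instr number_of_instructions_to_execute previous_values dependency_graph) := by unfold Pre_generate_instr_dependencies; infer_instance

def pvWitness_generate_instr_dependencies : String × (List (String × Int)) × (List (String × List String)) × (List (String × List String)) :=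
  ("a", [("b", 0)], [("b", [])], [("a", ["b"])])

def Spec_generate_instr_dependencies (instr : String) (number_of_instructions_to_execute : List (String × Int)) (previous_values : List (String × List String)) (dependency_graph : List (String × List String)) (out : Int × List String) : Prop := out = generate_instr_dependencies_alt instr number_of_instructions_to_execute previous_values dependency_graph
instance (instr : String) (number_of_instructions_to_execute : List (String × Int)) (previous_values : List (String × List String)) (dependency_graph : List (String × List String)) (out : Int × List String) : Decidable (Spec_generate_instr_dependencies instr number_of_instructions_to_execute previous_values dependency_graph out) := by unfold Spec_generate_instr_dependencies; infer_instance

-- ===== CLAIM (what is proved, stated in full; the proofs are below) =====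
def Claim_equal_generate_instr_dependencies : Prop := ∀ (instr : String) (number_of_instructions_to_execute : List (String × Int)) (previous_values : List (String × List String)) (dependency_graph : List (String × List String)), Dom_generate_instr_dependencies instr number_of_instructions_to_execute previous_values dependency_graph → Pre_generate_instr_dependencies instr number_of_instructions_to_execute previous_values dependency_graph → Spec_generate_instr_dependencies instr number_of_instructions_to_execute previous_values dependency_graph (generate_instr_dependencies instr number_of_instructions_to_execute previous_values dependency_graph)

-- ===== LEMMAS AND PROOFS =====

-- helper predicates for the equivalence proof
def pvClosed (D : PySem.Dict String (List String)) : Prop :=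
  ∀ k v, D.get? k = some v → ∀ x ∈ v, x ∈ D.keys

def pvAgree (Cf : PySem.Dict String Int) (Df : PySem.Dict String (List String))
    (C : PySem.Dict String Int) (D : PySem.Dict String (List String)) : Prop :=
  ∀ k, k ∈ D.keys → C.getD k 0 = Cf.getD k 0 ∧ D.get? k = Df.get? k

def pvInv (P : List String) (Cf : PySem.Dict String Int) (Df : PySem.Dict String (List String))
    (C : PySem.Dict String Int) (D : PySem.Dict String (List String)) : Prop :=
  pvAgree Cf Df C D ∧ pvClosed D ∧ ∀ k ∈ P, k ∈ D.keys

theorem pv_mem_keys_iff_isSome {ν : Type} (d : PySem.Dict String ν) (k : String) :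
    k ∈ d.keys ↔ (d.get? k).isSome := by
  rw [← PySem.Dict.contains_iff_mem_keys, PySem.Dict.contains_eq_isSome_get?]

theorem pv_getD_eq_of_get?_eq {ν : Type} (d d' : PySem.Dict String ν) (k : String) (v0 : ν)
    (h : d.get? k = d'.get? k) : d.getD k v0 = d'.getD k v0 := by
  rw [PySem.Dict.getD_eq_get?_getD, PySem.Dict.getD_eq_get?_getD, h]

theorem pvStepFn_eq_of_agree (Cf : PySem.Dict String Int) (Df : PySem.Dict String (List String))
    (C : PySem.Dict String Int) (D : PySem.Dict String (List String))
    (hA : pvAgree Cf Df C D) (acc : Int × PySem.Set String) (p : String)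
    (hp : p ∈ D.keys) (hacc : ∀ x ∈ acc.2, x ∈ D.keys) :
    pvStepFn C D acc p = pvStepFn Cf Df acc p := by
  have hDp : D.getD p [] = Df.getD p [] := pv_getD_eq_of_get?_eq _ _ _ _ (hA p hp).2
  have hCp : C.getD p 0 = Cf.getD p 0 := (hA p hp).1
  have hrep : ∀ rr ∈ PySem.Set.inter acc.2 (PySem.Set.union (Df.getD p []) [p]), rr ∈ D.keys := by
    intro rr h
    exact hacc rr ((PySem.Set.mem_inter _ _ _).mp h).1
  have h1 : List.foldl (fun u rr => PySem.Set.update u (D.getD rr [])) PySem.Set.empty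
        (PySem.Set.inter acc.2 (PySem.Set.union (Df.getD p []) [p]))
      = List.foldl (fun u rr => PySem.Set.update u (Df.getD rr [])) PySem.Set.empty
        (PySem.Set.inter acc.2 (PySem.Set.union (Df.getD p []) [p])) :=
    PySem.List.foldl_congr_mem _ _ _ _
      (fun u rr hm => by rw [pv_getD_eq_of_get?_eq D Df rr [] (hA rr (hrep rr hm)).2])
  have h2 : List.foldl (fun a rr => a + C.getD rr 0) 0
        (PySem.Set.diff (PySem.Set.inter acc.2 (PySem.Set.union (Df.getD p []) [p]))
          (List.foldl (fun u rr => PySem.Set.update u (Df.getD rr [])) PySem.Set.empty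
            (PySem.Set.inter acc.2 (PySem.Set.union (Df.getD p []) [p]))))
      = List.foldl (fun a rr => a + Cf.getD rr 0) 0
        (PySem.Set.diff (PySem.Set.inter acc.2 (PySem.Set.union (Df.getD p []) [p]))
          (List.foldl (fun u rr => PySem.Set.update u (Df.getD rr [])) PySem.Set.empty
            (PySem.Set.inter acc.2 (PySem.Set.union (Df.getD p []) [p])))) :=
    PySem.List.foldl_congr_mem _ _ _ _
      (fun a rr hm => by
        rw [(hA rr (hrep rr ((PySem.Set.mem_diff _ _ _).mp hm).1)).1])
  simp only [pvStepFn, hDp, hCp, h1, h2]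

theorem pvStepFn_mem (C : PySem.Dict String Int) (D : PySem.Dict String (List String))
    (hC : pvClosed D) (acc : Int × PySem.Set String) (p : String)
    (hp : p ∈ D.keys) (hacc : ∀ x ∈ acc.2, x ∈ D.keys) :
    ∀ x ∈ (pvStepFn C D acc p).2, x ∈ D.keys := by
  intro x hx
  simp only [pvStepFn] at hx
  rcases (PySem.Set.mem_union _ _ _).mp hx with h | h
  · exact hacc x h
  · rcases (PySem.Set.mem_union _ _ _).mp h with h' | h'
    · have hpS : (D.get? p).isSome := (pv_mem_keys_iff_isSome D p).mp hp
      cases hv : D.get? p with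
      | none => rw [hv] at hpS; simp at hpS
      | some v =>
        have : D.getD p [] = v := by rw [PySem.Dict.getD_eq_get?_getD, hv]; rfl
        rw [this] at h'
        exact hC p v hv x h'
    · have : x = p := by simpa using h'
      exact this ▸ hp

theorem pvFold_congr (Cf : PySem.Dict String Int) (Df : PySem.Dict String (List String))
    (C : PySem.Dict String Int) (D : PySem.Dict String (List String))
    (hA : pvAgree Cf Df C D) (hC : pvClosed D) :
    ∀ (ps : List String) (acc : Int × PySem.Set String),
      (∀ p ∈ ps, p ∈ D.keys) → (∀ x ∈ acc.2, x ∈ D.keys) →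
      ps.foldl (pvStepFn C D) acc = ps.foldl (pvStepFn Cf Df) acc ∧
      ∀ x ∈ (ps.foldl (pvStepFn C D) acc).2, x ∈ D.keys := by
  intro ps
  induction ps with
  | nil => intro acc _ hacc; exact ⟨rfl, hacc⟩
  | cons p ps ih =>
    intro acc hps hacc
    have hp : p ∈ D.keys := hps p (List.mem_cons_self ..)
    have heq := pvStepFn_eq_of_agree Cf Df C D hA acc p hp hacc
    have hmem := pvStepFn_mem C D hC acc p hp hacc
    have := ih (pvStepFn C D acc p) (fun q hq => hps q (List.mem_cons_of_mem _ hq)) hmem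
    refine ⟨?_, this.2⟩
    simp only [List.foldl_cons]
    rw [← heq]
    exact this.1

-- ---- B-side: sweep/loop lemmas ----

theorem pvStepB_skip (st : PySem.Dict String Int × PySem.Dict String (List String) × Bool)
    (kv : String × List String)
    (hg : (st.2.1.contains kv.1 || kv.2.any (fun p => !(st.2.1.contains p))) = true) :
    pvStepB st kv = st := by
  simp [pvStepB, hg]

theorem pvStepB_go (st : PySem.Dict String Int × PySem.Dict String (List String) × Bool)
    (kv : String × List String)
    (hg : (st.2.1.contains kv.1 || kv.2.any (fun p => !(st.2.1.contains p))) = false) :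
    pvStepB st kv =
      (st.1.insert kv.1 (kv.2.foldl (pvStepFn st.1 st.2.1) ((0 : Int), PySem.Set.empty)).1,
       st.2.1.insert kv.1 (kv.2.foldl (pvStepFn st.1 st.2.1) ((0 : Int), PySem.Set.empty)).2, true) := by
  simp only [pvStepB, hg]
  rfl

theorem pvStepB_guard_not_mem (st : PySem.Dict String Int × PySem.Dict String (List String) × Bool)
    (kv : String × List String)
    (hg : (st.2.1.contains kv.1 || kv.2.any (fun p => !(st.2.1.contains p))) = false) :
    kv.1 ∉ st.2.1.keys ∧ ∀ p ∈ kv.2, p ∈ st.2.1.keys := by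
  rw [Bool.or_eq_false_iff] at hg
  constructor
  · intro hmem
    have := (PySem.Dict.contains_iff_mem_keys _ _).mpr hmem
    rw [hg.1] at this
    exact Bool.false_ne_true this
  · intro p hp
    have := hg.2
    rw [List.any_eq_false] at this
    have h2 := this p hp
    have h3 : st.2.1.contains p = true := by
      revert h2; cases st.2.1.contains p <;> simp
    exact (PySem.Dict.contains_iff_mem_keys _ _).mp h3

theorem pvSweep_stab :
    ∀ (gs : List (String × List String))
      (st : PySem.Dict String Int × PySem.Dict String (List String) × Bool) (k : String),
      k ∈ st.2.1.keys →
      (gs.foldl pvStepB st).1.getD k 0 = st.1.getD k 0 ∧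
      (gs.foldl pvStepB st).2.1.get? k = st.2.1.get? k ∧
      k ∈ (gs.foldl pvStepB st).2.1.keys := by
  intro gs
  induction gs with
  | nil => intro st k hk; exact ⟨rfl, rfl, hk⟩
  | cons kv gs ih =>
    intro st k hk
    simp only [List.foldl_cons]
    by_cases hg : (st.2.1.contains kv.1 || kv.2.any (fun p => !(st.2.1.contains p))) = true
    · rw [pvStepB_skip st kv hg]
      exact ih st k hk
    · rw [Bool.not_eq_true] at hg
      rw [pvStepB_go st kv hg]
      obtain ⟨hnm, _⟩ := pvStepB_guard_not_mem st kv hg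
      have hne : k ≠ kv.1 := fun h => hnm (h ▸ hk)
      have hk' : k ∈ (st.2.1.insert kv.1
          (kv.2.foldl (pvStepFn st.1 st.2.1) ((0 : Int), PySem.Set.empty)).2).keys :=
        (PySem.Dict.mem_keys_insert _ _ _ _).mpr (Or.inr hk)
      obtain ⟨h1, h2, h3⟩ := ih (st.1.insert kv.1
          (kv.2.foldl (pvStepFn st.1 st.2.1) ((0 : Int), PySem.Set.empty)).1,
        st.2.1.insert kv.1
          (kv.2.foldl (pvStepFn st.1 st.2.1) ((0 : Int), PySem.Set.empty)).2, true) k hk'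
      refine ⟨?_, ?_, h3⟩
      · rw [h1]; exact PySem.Dict.getD_insert_of_ne _ _ _ hne
      · rw [h2]; exact PySem.Dict.get?_insert_of_ne _ _ hne

theorem pvSweep_changed_mono :
    ∀ (gs : List (String × List String))
      (st : PySem.Dict String Int × PySem.Dict String (List String) × Bool),
      st.2.2 = true → (gs.foldl pvStepB st).2.2 = true := by
  intro gs
  induction gs with
  | nil => intro st h; exact h
  | cons kv gs ih =>
    intro st h
    simp only [List.foldl_cons]
    by_cases hg : (st.2.1.contains kv.1 || kv.2.any (fun p => !(st.2.1.contains p))) = true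
    · rw [pvStepB_skip st kv hg]; exact ih st h
    · rw [Bool.not_eq_true] at hg
      rw [pvStepB_go st kv hg]
      exact ih (st.1.insert kv.1
          (kv.2.foldl (pvStepFn st.1 st.2.1) ((0 : Int), PySem.Set.empty)).1,
        st.2.1.insert kv.1
          (kv.2.foldl (pvStepFn st.1 st.2.1) ((0 : Int), PySem.Set.empty)).2, true) rfl

theorem pvSweep_quiet :
    ∀ (gs : List (String × List String))
      (st : PySem.Dict String Int × PySem.Dict String (List String) × Bool),
      (gs.foldl pvStepB st).2.2 = false → gs.foldl pvStepB st = st := by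
  intro gs
  induction gs with
  | nil => intro st _; rfl
  | cons kv gs ih =>
    intro st h
    simp only [List.foldl_cons] at h ⊢
    by_cases hg : (st.2.1.contains kv.1 || kv.2.any (fun p => !(st.2.1.contains p))) = true
    · rw [pvStepB_skip st kv hg] at h ⊢
      exact ih st h
    · rw [Bool.not_eq_true] at hg
      rw [pvStepB_go st kv hg] at h
      have := pvSweep_changed_mono gs (st.1.insert kv.1
          (kv.2.foldl (pvStepFn st.1 st.2.1) ((0 : Int), PySem.Set.empty)).1,
        st.2.1.insert kv.1
          (kv.2.foldl (pvStepFn st.1 st.2.1) ((0 : Int), PySem.Set.empty)).2, true) rfl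
      rw [this] at h
      exact absurd h (by simp)

theorem pvSweep_quiet_closure :
    ∀ (gs : List (String × List String))
      (st : PySem.Dict String Int × PySem.Dict String (List String) × Bool),
      (gs.foldl pvStepB st).2.2 = false →
      ∀ kv ∈ gs, kv.1 ∈ st.2.1.keys ∨ ∃ p ∈ kv.2, p ∉ st.2.1.keys := by
  intro gs
  induction gs with
  | nil => intro st _ kv h; exact absurd h (by simp)
  | cons kv0 gs ih =>
    intro st h kv hkv
    simp only [List.foldl_cons] at h
    by_cases hg : (st.2.1.contains kv0.1 || kv0.2.any (fun p => !(st.2.1.contains p))) = true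
    · rw [pvStepB_skip st kv0 hg] at h
      rcases List.mem_cons.mp hkv with heq | hm
      · subst heq
        rcases Bool.or_eq_true_iff.mp hg with h1 | h1
        · exact Or.inl ((PySem.Dict.contains_iff_mem_keys _ _).mp h1)
        · obtain ⟨p, hp, hp2⟩ := List.any_eq_true.mp h1
          refine Or.inr ⟨p, hp, fun hmem => ?_⟩
          rw [Bool.not_eq_true'] at hp2
          have := (PySem.Dict.contains_iff_mem_keys _ _).mpr hmem
          rw [hp2] at this
          exact Bool.false_ne_true this
      · exact ih st h kv hm
    · rw [Bool.not_eq_true] at hg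
      rw [pvStepB_go st kv0 hg] at h
      have := pvSweep_changed_mono gs (st.1.insert kv0.1
          (kv0.2.foldl (pvStepFn st.1 st.2.1) ((0 : Int), PySem.Set.empty)).1,
        st.2.1.insert kv0.1
          (kv0.2.foldl (pvStepFn st.1 st.2.1) ((0 : Int), PySem.Set.empty)).2, true) rfl
      rw [this] at h
      exact absurd h (by simp)

theorem pvSweep_changed_witness :
    ∀ (gs : List (String × List String))
      (st : PySem.Dict String Int × PySem.Dict String (List String) × Bool),
      st.2.2 = false → (gs.foldl pvStepB st).2.2 = true →
      ∃ k, k ∈ gs.map Prod.fst ∧ k ∉ st.2.1.keys ∧ k ∈ (gs.foldl pvStepB st).2.1.keys := by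
  intro gs
  induction gs with
  | nil => intro st h0 h1; rw [List.foldl_nil] at h1; rw [h0] at h1; exact absurd h1 (by simp)
  | cons kv gs ih =>
    intro st h0 h1
    simp only [List.foldl_cons] at h1 ⊢
    by_cases hg : (st.2.1.contains kv.1 || kv.2.any (fun p => !(st.2.1.contains p))) = true
    · rw [pvStepB_skip st kv hg] at h1 ⊢
      obtain ⟨k, hk1, hk2, hk3⟩ := ih st h0 h1
      exact ⟨k, by simp [hk1], hk2, hk3⟩
    · rw [Bool.not_eq_true] at hg
      rw [pvStepB_go st kv hg]
      obtain ⟨hnm, _⟩ := pvStepB_guard_not_mem st kv hg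
      refine ⟨kv.1, by simp, hnm, ?_⟩
      have hk' : kv.1 ∈ (st.2.1.insert kv.1
          (kv.2.foldl (pvStepFn st.1 st.2.1) ((0 : Int), PySem.Set.empty)).2).keys :=
        (PySem.Dict.mem_keys_insert _ _ _ _).mpr (Or.inl rfl)
      exact (pvSweep_stab gs _ kv.1 hk').2.2

theorem pvLoopB_stab (g : List (String × List String)) :
    ∀ (f : Nat) (st : PySem.Dict String Int × PySem.Dict String (List String)) (k : String),
      k ∈ st.2.keys →
      (pvLoopB g f st).1.getD k 0 = st.1.getD k 0 ∧
      (pvLoopB g f st).2.get? k = st.2.get? k ∧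
      k ∈ (pvLoopB g f st).2.keys := by
  intro f
  induction f with
  | zero => intro st k hk; exact ⟨rfl, rfl, hk⟩
  | succ f ih =>
    intro st k hk
    obtain ⟨s1, s2, s3⟩ := pvSweep_stab g (st.1, st.2, false) k hk
    by_cases hch : (g.foldl pvStepB (st.1, st.2, false)).2.2 = true
    · simp only [pvLoopB, hch, if_true]
      obtain ⟨t1, t2, t3⟩ := ih ((g.foldl pvStepB (st.1, st.2, false)).1,
        (g.foldl pvStepB (st.1, st.2, false)).2.1) k s3
      exact ⟨by rw [t1]; exact s1, by rw [t2]; exact s2, t3⟩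
    · rw [Bool.not_eq_true] at hch
      simp only [pvLoopB, hch]
      simp only [Bool.false_eq_true, if_false]
      exact ⟨s1, s2, s3⟩

theorem pv_countP_lt {α : Type} (l : List α) (p q : α → Bool)
    (h : ∀ x ∈ l, q x = true → p x = true)
    (x : α) (hx : x ∈ l) (hp : p x = true) (hq : q x = false) :
    l.countP q < l.countP p := by
  induction l with
  | nil => exact absurd hx (by simp)
  | cons a l ih =>
    have hle : l.countP q ≤ l.countP p :=
      List.countP_mono_left (fun y hy => h y (List.mem_cons_of_mem _ hy))
    rcases List.mem_cons.mp hx with heq | hm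
    · subst heq
      rw [List.countP_cons, List.countP_cons, hp, hq]
      simp
      omega
    · have := ih (fun y hy => h y (List.mem_cons_of_mem _ hy)) hm
      rw [List.countP_cons, List.countP_cons]
      by_cases hqa : q a = true
      · rw [hqa, h a (List.mem_cons_self ..) hqa]
        simp
        omega
      · rw [Bool.not_eq_true] at hqa
        rw [hqa]
        simp
        omega

theorem pvLoopB_fix (g : List (String × List String)) :
    ∀ (f : Nat) (C : PySem.Dict String Int) (D : PySem.Dict String (List String)),
      g.countP (fun kv => !(D.contains kv.1)) < f →
      ∀ kv ∈ g, (∀ p ∈ kv.2, p ∈ (pvLoopB g f (C, D)).2.keys) →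
        kv.1 ∈ (pvLoopB g f (C, D)).2.keys := by
  intro f
  induction f with
  | zero => intro C D hcount; omega
  | succ f ih =>
    intro C D hcount kv hkv hpred
    by_cases hch : (g.foldl pvStepB (C, D, false)).2.2 = true
    · have hL : pvLoopB g (f+1) (C, D) = pvLoopB g f
          ((g.foldl pvStepB (C, D, false)).1, (g.foldl pvStepB (C, D, false)).2.1) := by
        simp only [pvLoopB, hch, if_true]
      rw [hL] at hpred ⊢
      obtain ⟨w, hw1, hw2, hw3⟩ := pvSweep_changed_witness g (C, D, false) rfl hch
      have hsub : ∀ k ∈ D.keys, k ∈ (g.foldl pvStepB (C, D, false)).2.1.keys :=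
        fun k hk => (pvSweep_stab g (C, D, false) k hk).2.2
      have hlt : g.countP (fun kv => !((g.foldl pvStepB (C, D, false)).2.1.contains kv.1)) <
          g.countP (fun kv => !(D.contains kv.1)) := by
        obtain ⟨kv0, hkv0, hkv0f⟩ := List.mem_map.mp hw1
        refine pv_countP_lt g (fun kv => !(D.contains kv.1))
          (fun kv => !((g.foldl pvStepB (C, D, false)).2.1.contains kv.1)) ?_ kv0 hkv0 ?_ ?_
        · intro y hy hqy
          cases hDc : D.contains y.1 with
          | false => simp [hDc]
          | true =>
            have h1 := hsub y.1 ((PySem.Dict.contains_iff_mem_keys _ _).mp hDc)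
            have h2 := (PySem.Dict.contains_iff_mem_keys _ _).mpr h1
            simp [h2] at hqy
        · cases hDc : D.contains kv0.1 with
          | false => simp [hDc]
          | true => exact absurd (hkv0f ▸ (PySem.Dict.contains_iff_mem_keys _ _).mp hDc) hw2
        · have h1 : (g.foldl pvStepB (C, D, false)).2.1.contains kv0.1 = true :=
            (PySem.Dict.contains_iff_mem_keys _ _).mpr (hkv0f ▸ hw3)
          simp [h1]
      exact ih _ _ (by omega) kv hkv hpred
    · rw [Bool.not_eq_true] at hch
      have hq := pvSweep_quiet g (C, D, false) hch
      have hL : pvLoopB g (f+1) (C, D) =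
          ((g.foldl pvStepB (C, D, false)).1, (g.foldl pvStepB (C, D, false)).2.1) := by
        simp only [pvLoopB, hch]
        simp
      rw [hL, hq] at hpred ⊢
      rcases pvSweep_quiet_closure g (C, D, false) hch kv hkv with h | ⟨p, hp1, hp2⟩
      · exact h
      · exact absurd (hpred p hp1) hp2

-- the per-state invariant maintained by B's sweeps
def pvBInv (P : List String) (g : List (String × List String))
    (C : PySem.Dict String Int) (D : PySem.Dict String (List String)) : Prop :=
  pvClosed D ∧ (∀ x ∈ P, x ∈ D.keys) ∧
  (∀ kv ∈ g, kv.1 ∈ D.keys → kv.1 ∉ P →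
    (∀ p ∈ kv.2, p ∈ D.keys) ∧
    D.get? kv.1 = some ((kv.2.foldl (pvStepFn C D) ((0 : Int), PySem.Set.empty)).2) ∧
    C.getD kv.1 0 = (kv.2.foldl (pvStepFn C D) ((0 : Int), PySem.Set.empty)).1)

theorem pv_nodup_fst_eq {l : List (String × List String)}
    (h : (l.map Prod.fst).Nodup) {a b : String × List String}
    (ha : a ∈ l) (hb : b ∈ l) (hfst : a.1 = b.1) : a = b := by
  induction l with
  | nil => exact absurd ha (by simp)
  | cons x l ih =>
    rw [List.map_cons, List.nodup_cons] at h
    rcases List.mem_cons.mp ha with h1 | h1 <;> rcases List.mem_cons.mp hb with h2 | h2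
    · rw [h1, h2]
    · subst h1
      exact absurd (hfst ▸ List.mem_map_of_mem (f := Prod.fst) h2) h.1
    · subst h2
      exact absurd (hfst ▸ List.mem_map_of_mem (f := Prod.fst) h1) h.1
    · exact ih h.2 h1 h2

theorem pvBInv_sweep (P : List String) (g : List (String × List String))
    (hnd : (g.map Prod.fst).Nodup) :
    ∀ (gs : List (String × List String)), (∀ kv ∈ gs, kv ∈ g) →
    ∀ (C : PySem.Dict String Int) (D : PySem.Dict String (List String)) (b : Bool),
      pvBInv P g C D →
      pvBInv P g (gs.foldl pvStepB (C, D, b)).1 (gs.foldl pvStepB (C, D, b)).2.1 := by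
  intro gs
  induction gs with
  | nil => intro _ C D b hInv; exact hInv
  | cons kv gs ih =>
    intro hsub C D b hInv
    obtain ⟨hcl, hP, heq⟩ := hInv
    have hkvg : kv ∈ g := hsub kv (List.mem_cons_self ..)
    simp only [List.foldl_cons]
    by_cases hg : ((C, D, b).2.1.contains kv.1 || kv.2.any (fun p => !((C, D, b).2.1.contains p))) = true
    · rw [pvStepB_skip (C, D, b) kv hg]
      exact ih (fun x hx => hsub x (List.mem_cons_of_mem _ hx)) C D b ⟨hcl, hP, heq⟩
    · rw [Bool.not_eq_true] at hg
      rw [pvStepB_go (C, D, b) kv hg]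
      obtain ⟨hnm, hpreds⟩ := pvStepB_guard_not_mem (C, D, b) kv hg
      set r := kv.2.foldl (pvStepFn C D) ((0 : Int), PySem.Set.empty) with hr
      have hempty : ∀ x ∈ (((0 : Int), PySem.Set.empty (α := String))).2, x ∈ D.keys := by
        intro x hx; simp [PySem.Set.empty] at hx
      have hagree : pvAgree (C.insert kv.1 r.1) (D.insert kv.1 r.2) C D := by
        intro k hk
        have hne : k ≠ kv.1 := fun h => hnm (h ▸ hk)
        exact ⟨(PySem.Dict.getD_insert_of_ne _ _ _ hne).symm,
               (PySem.Dict.get?_insert_of_ne _ _ hne).symm⟩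
      have htriv : pvAgree C D C D := fun k _ => ⟨rfl, rfl⟩
      have hrmem : ∀ x ∈ r.2, x ∈ D.keys :=
        (pvFold_congr C D C D htriv hcl kv.2 _ hpreds hempty).2
      have hcongr : ∀ (ps : List String), (∀ p ∈ ps, p ∈ D.keys) →
          ps.foldl (pvStepFn C D) ((0 : Int), PySem.Set.empty) =
          ps.foldl (pvStepFn (C.insert kv.1 r.1) (D.insert kv.1 r.2)) ((0 : Int), PySem.Set.empty) :=
        fun ps hps => (pvFold_congr _ _ C D hagree hcl ps _ hps hempty).1
      have hcl' : pvClosed (D.insert kv.1 r.2) := by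
        intro k w hw x hx
        by_cases hk : k = kv.1
        · subst hk
          rw [PySem.Dict.get?_insert_self] at hw
          injection hw with hw
          exact (PySem.Dict.mem_keys_insert _ _ _ _).mpr (Or.inr (hrmem x (hw ▸ hx)))
        · rw [PySem.Dict.get?_insert_of_ne _ _ hk] at hw
          exact (PySem.Dict.mem_keys_insert _ _ _ _).mpr (Or.inr (hcl k w hw x hx))
      have hP' : ∀ x ∈ P, x ∈ (D.insert kv.1 r.2).keys :=
        fun x hx => (PySem.Dict.mem_keys_insert _ _ _ _).mpr (Or.inr (hP x hx))
      have heq' : ∀ kv' ∈ g, kv'.1 ∈ (D.insert kv.1 r.2).keys → kv'.1 ∉ P →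
          (∀ p ∈ kv'.2, p ∈ (D.insert kv.1 r.2).keys) ∧
          (D.insert kv.1 r.2).get? kv'.1 =
            some ((kv'.2.foldl (pvStepFn (C.insert kv.1 r.1) (D.insert kv.1 r.2)) ((0 : Int), PySem.Set.empty)).2) ∧
          (C.insert kv.1 r.1).getD kv'.1 0 =
            (kv'.2.foldl (pvStepFn (C.insert kv.1 r.1) (D.insert kv.1 r.2)) ((0 : Int), PySem.Set.empty)).1 := by
        intro kv' hkv' hk' hnP
        by_cases hfst : kv'.1 = kv.1
        · have : kv' = kv := pv_nodup_fst_eq hnd hkv' hkvg hfst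
          subst this
          refine ⟨fun p hp => (PySem.Dict.mem_keys_insert _ _ _ _).mpr (Or.inr (hpreds p hp)), ?_, ?_⟩
          · rw [hfst, PySem.Dict.get?_insert_self, ← hcongr kv'.2 hpreds]
          · rw [hfst, PySem.Dict.getD_insert_self, ← hcongr kv'.2 hpreds]
        · have hkD : kv'.1 ∈ D.keys := by
            rcases (PySem.Dict.mem_keys_insert _ _ _ _).mp hk' with h | h
            · exact absurd h hfst
            · exact h
          obtain ⟨hpr, he1, he2⟩ := heq kv' hkv' hkD hnP
          refine ⟨fun p hp => (PySem.Dict.mem_keys_insert _ _ _ _).mpr (Or.inr (hpr p hp)), ?_, ?_⟩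
          · rw [PySem.Dict.get?_insert_of_ne _ _ hfst, he1, hcongr kv'.2 hpr]
          · rw [PySem.Dict.getD_insert_of_ne _ _ _ hfst, he2, hcongr kv'.2 hpr]
      exact ih (fun x hx => hsub x (List.mem_cons_of_mem _ hx)) _ _ true ⟨hcl', hP', heq'⟩

theorem pvBInv_loop (P : List String) (g : List (String × List String))
    (hnd : (g.map Prod.fst).Nodup) :
    ∀ (f : Nat) (C : PySem.Dict String Int) (D : PySem.Dict String (List String)),
      pvBInv P g C D →
      pvBInv P g (pvLoopB g f (C, D)).1 (pvLoopB g f (C, D)).2 := by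
  intro f
  induction f with
  | zero => intro C D h; exact h
  | succ f ih =>
    intro C D hInv
    have hsw := pvBInv_sweep P g hnd g (fun kv h => h) C D false hInv
    by_cases hch : (g.foldl pvStepB (C, D, false)).2.2 = true
    · have hL : pvLoopB g (f+1) (C, D) = pvLoopB g f
          ((g.foldl pvStepB (C, D, false)).1, (g.foldl pvStepB (C, D, false)).2.1) := by
        simp only [pvLoopB, hch]
        simp
      rw [hL]
      exact ih _ _ hsw
    · rw [Bool.not_eq_true] at hch
      have hL : pvLoopB g (f+1) (C, D) =
          ((g.foldl pvStepB (C, D, false)).1, (g.foldl pvStepB (C, D, false)).2.1) := by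
        simp only [pvLoopB, hch]
        simp
      rw [hL]
      exact hsw

-- ---- grounded-set lemmas ----

theorem pvGrounded_mono (P : List String) (g : List (String × List String)) :
    ∀ (m n : Nat), m ≤ n → ∀ x ∈ pvGrounded P g m, x ∈ pvGrounded P g n := by
  intro m n hmn
  induction n, hmn using Nat.le_induction with
  | base => exact fun x hx => hx
  | succ n hmn ih =>
    intro x hx
    show x ∈ pvGrounded P g (n+1)
    simp only [pvGrounded]
    exact List.mem_append_left _ (ih x hx)

theorem pvGrounded_src (P : List String) (g : List (String × List String)) :
    ∀ (n : Nat) (x : String), x ∈ pvGrounded P g n →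
      x ∈ P ∨ ∃ kv ∈ g, kv.1 = x ∧ ∃ m, m < n ∧ ∀ p ∈ kv.2, p ∈ pvGrounded P g m := by
  intro n
  induction n with
  | zero => intro x hx; exact Or.inl hx
  | succ n ih =>
    intro x hx
    simp only [pvGrounded] at hx
    rcases List.mem_append.mp hx with h | h
    · rcases ih x h with h1 | ⟨kv, hkv, hkv1, m, hm, hp⟩
      · exact Or.inl h1
      · exact Or.inr ⟨kv, hkv, hkv1, m, by omega, hp⟩
    · obtain ⟨kv, hkv, hkv1⟩ := List.mem_map.mp h
      have hmemf := List.mem_filter.mp hkv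
      refine Or.inr ⟨kv, hmemf.1, hkv1, n, by omega, ?_⟩
      intro p hp
      have hall := (Bool.and_eq_true_iff.mp hmemf.2).2
      have := List.all_eq_true.mp hall p hp
      simpa using this

theorem pvGrounded_sub (P : List String) (g : List (String × List String))
    (Df : PySem.Dict String (List String))
    (hP : ∀ x ∈ P, x ∈ Df.keys)
    (hfix : ∀ kv ∈ g, (∀ p ∈ kv.2, p ∈ Df.keys) → kv.1 ∈ Df.keys) :
    ∀ (n : Nat), ∀ x ∈ pvGrounded P g n, x ∈ Df.keys := by
  intro n
  induction n with
  | zero => exact hP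
  | succ n ih =>
    intro x hx
    simp only [pvGrounded] at hx
    rcases List.mem_append.mp hx with h | h
    · exact ih x h
    · obtain ⟨kv, hkv, hkv1⟩ := List.mem_map.mp h
      have hmemf := List.mem_filter.mp hkv
      have hall := (Bool.and_eq_true_iff.mp hmemf.2).2
      refine hkv1 ▸ hfix kv hmemf.1 (fun p hp => ?_)
      have := List.all_eq_true.mp hall p hp
      exact ih p (by simpa using this)

-- ---- A-side: the recursion computes the final tables' values ----

def pvABody (G : List (String × List String)) (f : Nat)
    (st : (Int × PySem.Set String) × PySem.Dict String Int × PySem.Dict String (List String))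
    (p : String) : (Int × PySem.Set String) × PySem.Dict String Int × PySem.Dict String (List String) :=
  let res := pvGoA (PySem.Dict.mk G) f p st.2.1 st.2.2
  let previous := PySem.Set.union res.1.2 [p]
  let repeated := PySem.Set.inter st.1.2 previous
  let bigU := repeated.foldl (fun u rr => PySem.Set.update u (res.2.2.getD rr [])) PySem.Set.empty
  let maximal := PySem.Set.diff repeated bigU
  ((st.1.1 + res.1.1 + 1 - maximal.foldl (fun a rr => a + res.2.1.getD rr 0) 0,
    PySem.Set.union st.1.2 previous), res.2)

theorem pvGoA_eq_some (G : List (String × List String)) (f : Nat) (instr : String)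
    (C : PySem.Dict String Int) (D : PySem.Dict String (List String)) (v : List String)
    (hD : D.get? instr = some v) :
    pvGoA (PySem.Dict.mk G) (f+1) instr C D = ((C.getD instr 0, v), C, D) := by
  rw [pvGoA, hD]

theorem pvGoA_eq_none (G : List (String × List String)) (f : Nat) (instr : String)
    (C : PySem.Dict String Int) (D : PySem.Dict String (List String))
    (hD : D.get? instr = none) :
    pvGoA (PySem.Dict.mk G) (f+1) instr C D =
      ((((PySem.Dict.mk G).getD instr []).foldl (pvABody G f) (((0 : Int), PySem.Set.empty), C, D)).1,
       (((PySem.Dict.mk G).getD instr []).foldl (pvABody G f) (((0 : Int), PySem.Set.empty), C, D)).2.1.insert instr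
         (((PySem.Dict.mk G).getD instr []).foldl (pvABody G f) (((0 : Int), PySem.Set.empty), C, D)).1.1,
       (((PySem.Dict.mk G).getD instr []).foldl (pvABody G f) (((0 : Int), PySem.Set.empty), C, D)).2.2.insert instr
         (((PySem.Dict.mk G).getD instr []).foldl (pvABody G f) (((0 : Int), PySem.Set.empty), C, D)).1.2) := by
  rw [pvGoA, hD]
  rfl

theorem pvGoA_main (G : List (String × List String)) (P : List String)
    (Cf : PySem.Dict String Int) (Df : PySem.Dict String (List String))
    (hnd : (G.map Prod.fst).Nodup)
    (HF : ∀ kv ∈ G, kv.1 ∉ P → kv.1 ∈ pvGrounded P G G.length →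
      Df.get? kv.1 = some ((kv.2.foldl (pvStepFn Cf Df) ((0 : Int), PySem.Set.empty)).2) ∧
      Cf.getD kv.1 0 = (kv.2.foldl (pvStepFn Cf Df) ((0 : Int), PySem.Set.empty)).1) :
    ∀ (fuel : Nat) (instr : String) (C : PySem.Dict String Int) (D : PySem.Dict String (List String)),
      pvInv P Cf Df C D →
      ((instr ∈ D.keys ∧ 1 ≤ fuel) ∨ ∃ r, instr ∈ pvGrounded P G r ∧ r < fuel ∧ r ≤ G.length) →
      (pvGoA (PySem.Dict.mk G) fuel instr C D).1 = (Cf.getD instr 0, Df.getD instr []) ∧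
      pvInv P Cf Df (pvGoA (PySem.Dict.mk G) fuel instr C D).2.1 (pvGoA (PySem.Dict.mk G) fuel instr C D).2.2 ∧
      (∀ k ∈ D.keys, k ∈ (pvGoA (PySem.Dict.mk G) fuel instr C D).2.2.keys) ∧
      instr ∈ (pvGoA (PySem.Dict.mk G) fuel instr C D).2.2.keys := by
  intro fuel
  induction fuel with
  | zero =>
    intro instr C D _ hok
    rcases hok with ⟨_, h⟩ | ⟨r, _, h, _⟩ <;> omega
  | succ f IH =>
    intro instr C D hInv hok
    obtain ⟨hAg, hCl, hPk⟩ := hInv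
    cases hD : D.get? instr with
    | some v =>
      have hmem : instr ∈ D.keys := (pv_mem_keys_iff_isSome D instr).mpr (by rw [hD]; rfl)
      rw [pvGoA_eq_some G f instr C D v hD]
      refine ⟨?_, ⟨hAg, hCl, hPk⟩, fun k hk => hk, hmem⟩
      have hdf : Df.getD instr [] = v := by
        rw [PySem.Dict.getD_eq_get?_getD, ← (hAg instr hmem).2, hD]
        rfl
      rw [(hAg instr hmem).1, hdf]
    | none =>
      have hnmem : instr ∉ D.keys := (PySem.Dict.get?_eq_none_iff_not_mem_keys D instr).mp hD
      rcases hok with ⟨hmem, _⟩ | ⟨r, hSr, hrf, hrG⟩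
      · exact absurd hmem hnmem
      have hinstrP : instr ∉ P := fun h => hnmem (hPk instr h)
      rcases pvGrounded_src P G r instr hSr with h | ⟨kv, hkv, hkv1, m, hmr, hpredS⟩
      · exact absurd h hinstrP
      have hgetG : (PySem.Dict.mk G).getD instr [] = kv.2 := by
        have hmemit : (instr, kv.2) ∈ (PySem.Dict.mk G).items := by
          rw [← hkv1, Prod.mk.eta]
          exact hkv
        have hkeys : (PySem.Dict.mk G).keys.Nodup := by
          simp [PySem.Dict.keys_mk]
          exact hnd
        have hsome := (PySem.Dict.get?_eq_some_iff_mem_items _ instr kv.2 hkeys).mpr hmemit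
        rw [PySem.Dict.getD_eq_get?_getD, hsome]
        rfl
      have hfold : ∀ (ps : List String),
          (∀ p ∈ ps, ∃ m', p ∈ pvGrounded P G m' ∧ m' < f ∧ m' ≤ G.length) →
          ∀ (acc : Int × PySem.Set String) (C' : PySem.Dict String Int)
            (D' : PySem.Dict String (List String)),
          pvInv P Cf Df C' D' → (∀ x ∈ acc.2, x ∈ D'.keys) →
          (ps.foldl (pvABody G f) (acc, C', D')).1 = ps.foldl (pvStepFn Cf Df) acc ∧
          pvInv P Cf Df (ps.foldl (pvABody G f) (acc, C', D')).2.1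
            (ps.foldl (pvABody G f) (acc, C', D')).2.2 ∧
          (∀ k ∈ D'.keys, k ∈ (ps.foldl (pvABody G f) (acc, C', D')).2.2.keys) ∧
          (∀ x ∈ (ps.foldl (pvABody G f) (acc, C', D')).1.2,
            x ∈ (ps.foldl (pvABody G f) (acc, C', D')).2.2.keys) := by
        intro ps
        induction ps with
        | nil =>
          intro _ acc C' D' hInv' hacc
          exact ⟨rfl, hInv', fun k hk => hk, hacc⟩
        | cons p ps ihp =>
          intro hpsok acc C' D' hInv' hacc
          obtain ⟨m', hpS, hmf, hmG⟩ := hpsok p (List.mem_cons_self ..)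
          have hok' : (p ∈ D'.keys ∧ 1 ≤ f) ∨
              ∃ r', p ∈ pvGrounded P G r' ∧ r' < f ∧ r' ≤ G.length :=
            Or.inr ⟨m', hpS, hmf, hmG⟩
          obtain ⟨hres1, hresInv, hresMono, hresMem⟩ := IH p C' D' hInv' hok'
          have hbig : List.foldl
                (fun u rr => PySem.Set.update u ((pvGoA (PySem.Dict.mk G) f p C' D').2.2.getD rr []))
                PySem.Set.empty
                (PySem.Set.inter acc.2 (PySem.Set.union (Df.getD p []) [p]))
              = List.foldl (fun u rr => PySem.Set.update u (Df.getD rr []))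
                PySem.Set.empty
                (PySem.Set.inter acc.2 (PySem.Set.union (Df.getD p []) [p])) := by
            refine PySem.List.foldl_congr_mem _ _ _ _ (fun u rr hm' => ?_)
            have hrr : rr ∈ D'.keys := hacc rr ((PySem.Set.mem_inter _ _ _).mp hm').1
            rw [pv_getD_eq_of_get?_eq _ Df rr []
              (hresInv.1 rr (hresMono rr hrr)).2]
          have hcnt : List.foldl
                (fun a rr => a + (pvGoA (PySem.Dict.mk G) f p C' D').2.1.getD rr 0) 0
                (PySem.Set.diff (PySem.Set.inter acc.2 (PySem.Set.union (Df.getD p []) [p]))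
                  (List.foldl (fun u rr => PySem.Set.update u (Df.getD rr [])) PySem.Set.empty
                    (PySem.Set.inter acc.2 (PySem.Set.union (Df.getD p []) [p]))))
              = List.foldl (fun a rr => a + Cf.getD rr 0) 0
                (PySem.Set.diff (PySem.Set.inter acc.2 (PySem.Set.union (Df.getD p []) [p]))
                  (List.foldl (fun u rr => PySem.Set.update u (Df.getD rr [])) PySem.Set.empty
                    (PySem.Set.inter acc.2 (PySem.Set.union (Df.getD p []) [p])))) := by
            refine PySem.List.foldl_congr_mem _ _ _ _ (fun a rr hm' => ?_)
            have hrr : rr ∈ D'.keys :=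
              hacc rr ((PySem.Set.mem_inter _ _ _).mp ((PySem.Set.mem_diff _ _ _).mp hm').1).1
            rw [(hresInv.1 rr (hresMono rr hrr)).1]
          have hstep : pvABody G f (acc, C', D') p =
              (pvStepFn Cf Df acc p,
               (pvGoA (PySem.Dict.mk G) f p C' D').2.1,
               (pvGoA (PySem.Dict.mk G) f p C' D').2.2) := by
            simp only [pvABody, pvStepFn, hres1]
            rw [hbig, hcnt]
          have haccmem : ∀ x ∈ (pvStepFn Cf Df acc p).2,
              x ∈ (pvGoA (PySem.Dict.mk G) f p C' D').2.2.keys := by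
            intro x hx
            simp only [pvStepFn] at hx
            rcases (PySem.Set.mem_union _ _ _).mp hx with h | h
            · exact hresMono x (hacc x h)
            · rcases (PySem.Set.mem_union _ _ _).mp h with h' | h'
              · have hsome : ((pvGoA (PySem.Dict.mk G) f p C' D').2.2.get? p).isSome :=
                  (pv_mem_keys_iff_isSome _ p).mp hresMem
                cases hv : (pvGoA (PySem.Dict.mk G) f p C' D').2.2.get? p with
                | none => rw [hv] at hsome; simp at hsome
                | some w =>
                  have hDfv : Df.getD p [] = w := by
                    rw [PySem.Dict.getD_eq_get?_getD, ← (hresInv.1 p hresMem).2, hv]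
                    rfl
                  exact hresInv.2.1 p w hv x (hDfv ▸ h')
              · have hxp : x = p := by simpa using h'
                exact hxp ▸ hresMem
          have hrest := ihp (fun q hq => hpsok q (List.mem_cons_of_mem _ hq))
            (pvStepFn Cf Df acc p)
            (pvGoA (PySem.Dict.mk G) f p C' D').2.1
            (pvGoA (PySem.Dict.mk G) f p C' D').2.2
            hresInv haccmem
          rw [List.foldl_cons, hstep]
          refine ⟨hrest.1, hrest.2.1, ?_, hrest.2.2.2⟩
          intro k hk
          exact hrest.2.2.1 k (hresMono k hk)
      obtain ⟨hF1, hF2⟩ := HF kv hkv (hkv1 ▸ hinstrP)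
        (pvGrounded_mono P G r G.length hrG kv.1 (hkv1 ▸ hSr))
      rw [hkv1] at hF1 hF2
      have hpok : ∀ p ∈ kv.2, ∃ m', p ∈ pvGrounded P G m' ∧ m' < f ∧ m' ≤ G.length := by
        intro p hp
        exact ⟨m, hpredS p hp, by omega, by omega⟩
      have hempty : ∀ x ∈ (((0 : Int), PySem.Set.empty (α := String))).2, x ∈ D.keys := by
        intro x hx
        simp [PySem.Set.empty] at hx
      obtain ⟨hfeq, hfInv, hfMono, hfMem⟩ :=
        hfold kv.2 hpok ((0 : Int), PySem.Set.empty) C D ⟨hAg, hCl, hPk⟩ hempty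
      rw [pvGoA_eq_none G f instr C D hD, hgetG]
      set R := (kv.2.foldl (pvABody G f) ((((0 : Int), PySem.Set.empty)), C, D)) with hR
      have hn : R.1.1 = (kv.2.foldl (pvStepFn Cf Df) ((0 : Int), PySem.Set.empty)).1 := by
        rw [hfeq]
      have hs : R.1.2 = (kv.2.foldl (pvStepFn Cf Df) ((0 : Int), PySem.Set.empty)).2 := by
        rw [hfeq]
      refine ⟨?_, ⟨?_, ?_, ?_⟩, ?_, ?_⟩
      · have hdf : Df.getD instr [] = R.1.2 := by
          rw [PySem.Dict.getD_eq_get?_getD, hF1, hs]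
          rfl
        have hcf : Cf.getD instr 0 = R.1.1 := by rw [hF2, hn]
        rw [hdf, hcf]
      · -- agreement for the new state
        intro k hk
        by_cases hke : k = instr
        · subst hke
          constructor
          · rw [PySem.Dict.getD_insert_self, hF2, hn]
          · rw [PySem.Dict.get?_insert_self, hF1, hs]
        · have hkold : k ∈ R.2.2.keys := by
            rcases (PySem.Dict.mem_keys_insert _ _ _ _).mp hk with h | h
            · exact absurd h hke
            · exact h
          constructor
          · rw [PySem.Dict.getD_insert_of_ne _ _ _ hke]
            exact (hfInv.1 k hkold).1
          · rw [PySem.Dict.get?_insert_of_ne _ _ hke]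
            exact (hfInv.1 k hkold).2
      · -- closedness of the new deps dict
        intro k w hw x hx
        by_cases hk : k = instr
        · subst hk
          rw [PySem.Dict.get?_insert_self] at hw
          injection hw with hw
          exact (PySem.Dict.mem_keys_insert _ _ _ _).mpr (Or.inr (hfMem x (hw ▸ hx)))
        · rw [PySem.Dict.get?_insert_of_ne _ _ hk] at hw
          exact (PySem.Dict.mem_keys_insert _ _ _ _).mpr (Or.inr (hfInv.2.1 k w hw x hx))
      · intro k hk
        exact (PySem.Dict.mem_keys_insert _ _ _ _).mpr (Or.inr (hfInv.2.2 k hk))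
      · intro k hk
        exact (PySem.Dict.mem_keys_insert _ _ _ _).mpr (Or.inr (hfMono k hk))
      · exact (PySem.Dict.mem_keys_insert _ _ _ _).mpr (Or.inl rfl)

-- ===== VERDICT (by name: the statement is the Claim_ definition above) =====
theorem generate_instr_dependencies_spec : Claim_equal_generate_instr_dependencies := by
  intro instr num pv graph _hdom hpre
  show generate_instr_dependencies instr num pv graph =
    generate_instr_dependencies_alt instr num pv graph
  rcases hpre with ⟨hip, _hin⟩ | ⟨hnp, hndP, hndG, _hcnts, hpvals, hground⟩
  · -- instr already analyzed: both return the memoized pair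
    have hkeys : instr ∈ (PySem.Dict.mk pv).keys := by
      simpa [PySem.Dict.keys_mk] using hip
    have hsome : ((PySem.Dict.mk pv).get? instr).isSome :=
      (pv_mem_keys_iff_isSome _ instr).mp hkeys
    cases hv : (PySem.Dict.mk pv).get? instr with
    | none => rw [hv] at hsome; simp at hsome
    | some v =>
      have halt : generate_instr_dependencies_alt instr num pv graph =
          ((PySem.Dict.mk num).getD instr 0, v) := by
        unfold generate_instr_dependencies_alt
        rw [hv]
      have ha : generate_instr_dependencies instr num pv graph =
          ((PySem.Dict.mk num).getD instr 0, v) := by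
        unfold generate_instr_dependencies
        rw [pvGoA_eq_some graph graph.length instr _ _ v hv]
      rw [ha, halt]
  · -- instr not yet analyzed: compare with B's sweep loop
    have hnp' : instr ∉ (PySem.Dict.mk pv).keys := by
      simpa [PySem.Dict.keys_mk] using hnp
    have hvnone : (PySem.Dict.mk pv).get? instr = none :=
      (PySem.Dict.get?_eq_none_iff_not_mem_keys _ instr).mpr hnp'
    have halt : generate_instr_dependencies_alt instr num pv graph =
        ((pvLoopB graph (graph.length + 1) (PySem.Dict.mk num, PySem.Dict.mk pv)).1.getD instr 0,
         (pvLoopB graph (graph.length + 1) (PySem.Dict.mk num, PySem.Dict.mk pv)).2.getD instr []) := by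
      unfold generate_instr_dependencies_alt
      rw [hvnone]
    have hclpv : pvClosed (PySem.Dict.mk pv) := by
      intro k w hw x hx
      have hkeysnd : (PySem.Dict.mk pv).keys.Nodup := by
        simpa [PySem.Dict.keys_mk] using hndP
      have hmem : (k, w) ∈ pv := by
        have := (PySem.Dict.get?_eq_some_iff_mem_items _ k w hkeysnd).mp hw
        simpa using this
      have := hpvals (k, w) hmem x hx
      simpa [PySem.Dict.keys_mk] using this
    have hBInv0 : pvBInv (pv.map Prod.fst) graph (PySem.Dict.mk num) (PySem.Dict.mk pv) := by
      refine ⟨hclpv, ?_, ?_⟩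
      · intro x hx
        simpa [PySem.Dict.keys_mk] using hx
      · intro kv _ hk hnPk
        exact absurd (by simpa [PySem.Dict.keys_mk] using hk) hnPk
    have hBInvF := pvBInv_loop (pv.map Prod.fst) graph hndG (graph.length + 1)
      (PySem.Dict.mk num) (PySem.Dict.mk pv) hBInv0
    have hclosure := pvLoopB_fix graph (graph.length + 1)
      (PySem.Dict.mk num) (PySem.Dict.mk pv)
      (by have := List.countP_le_length (l := graph)
            (p := fun kv => !((PySem.Dict.mk pv).contains kv.1))
          omega)
    have hsubG := pvGrounded_sub (pv.map Prod.fst) graph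
      (pvLoopB graph (graph.length + 1) (PySem.Dict.mk num, PySem.Dict.mk pv)).2
      hBInvF.2.1 hclosure
    have HF : ∀ kv ∈ graph, kv.1 ∉ pv.map Prod.fst →
        kv.1 ∈ pvGrounded (pv.map Prod.fst) graph graph.length →
        (pvLoopB graph (graph.length + 1) (PySem.Dict.mk num, PySem.Dict.mk pv)).2.get? kv.1 =
          some ((kv.2.foldl (pvStepFn
            (pvLoopB graph (graph.length + 1) (PySem.Dict.mk num, PySem.Dict.mk pv)).1
            (pvLoopB graph (graph.length + 1) (PySem.Dict.mk num, PySem.Dict.mk pv)).2)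
            ((0 : Int), PySem.Set.empty)).2) ∧
        (pvLoopB graph (graph.length + 1) (PySem.Dict.mk num, PySem.Dict.mk pv)).1.getD kv.1 0 =
          (kv.2.foldl (pvStepFn
            (pvLoopB graph (graph.length + 1) (PySem.Dict.mk num, PySem.Dict.mk pv)).1
            (pvLoopB graph (graph.length + 1) (PySem.Dict.mk num, PySem.Dict.mk pv)).2)
            ((0 : Int), PySem.Set.empty)).1 := by
      intro kv hkv hnPk hgr
      have hmemf : kv.1 ∈ (pvLoopB graph (graph.length + 1)
          (PySem.Dict.mk num, PySem.Dict.mk pv)).2.keys := hsubG graph.length kv.1 hgr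
      exact ⟨(hBInvF.2.2 kv hkv hmemf hnPk).2.1, (hBInvF.2.2 kv hkv hmemf hnPk).2.2⟩
    have hInv0 : pvInv (pv.map Prod.fst)
        (pvLoopB graph (graph.length + 1) (PySem.Dict.mk num, PySem.Dict.mk pv)).1
        (pvLoopB graph (graph.length + 1) (PySem.Dict.mk num, PySem.Dict.mk pv)).2
        (PySem.Dict.mk num) (PySem.Dict.mk pv) := by
      refine ⟨?_, hclpv, ?_⟩
      · intro k hk
        obtain ⟨t1, t2, _⟩ := pvLoopB_stab graph (graph.length + 1)
          (PySem.Dict.mk num, PySem.Dict.mk pv) k hk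
        exact ⟨t1.symm, t2.symm⟩
      · intro k hk
        simpa [PySem.Dict.keys_mk] using hk
    obtain ⟨hres, _, _, _⟩ := pvGoA_main graph (pv.map Prod.fst)
      (pvLoopB graph (graph.length + 1) (PySem.Dict.mk num, PySem.Dict.mk pv)).1
      (pvLoopB graph (graph.length + 1) (PySem.Dict.mk num, PySem.Dict.mk pv)).2
      hndG HF (graph.length + 1) instr (PySem.Dict.mk num) (PySem.Dict.mk pv)
      hInv0 (Or.inr ⟨graph.length, hground, by omega, Nat.le_refl _⟩)
    rw [halt]
    exact hres
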